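-- pv_equiv track=rewrite | github.com/pmorandev/Exam_3_COP_1000C | gradeScores-4.py | counts_grade_letters
-- ===== SOURCE A (Python) =====
-- def counts_grade_letters(grades):
--     """Counts the occurrences of each grade letter in a list of grades.
--     Args:
--         grades (list): A list of numerical grades.
--     Returns:
--         dict: A dictionary where keys are grade letters and values are their counts.
--     """
--     grade_counts = {
--         'A': 0, 'B': 0, 'C': 0, 'D': 0, 'F': 0
--     }
--     for grade in grades:
--         if 90 <= grade <= 110:
--             grade_counts['A'] += 1
--         elif 80 <= grade <90:
--             grade_counts['B'] += 1
--         elif 70 <= grade < 80: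
--             grade_counts['C'] += 1
--         elif 60 <= grade < 70:
--             grade_counts['D'] += 1
--         else:
--             grade_counts['F'] += 1
--
--     return grade_counts
-- ===== SOURCE B (Python) =====
-- def _letter(grade):
--     """Grade letter by arithmetic bucketing instead of a branch cascade."""
--     if grade < 60 or grade > 110:
--         return 'F'
--     return ['D', 'C', 'B', 'A'][min((grade - 60) // 10, 3)]
--
--
-- def counts_grade_letters(grades):
--     letters = [_letter(g) for g in grades]
--     return {k: letters.count(k) for k in ('A', 'B', 'C', 'D', 'F')}
-- ===== Notes on version B (the rewrite author's own statement) =====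
-- stated objective: idiomatic
-- what changed: Replaces A's if/elif cascade incrementing a dict in one pass by arithmetic bucketing (index a D/C/B/A table by (grade-60)//10 capped at 3) to classify each grade, then a dict comprehension counting each of the five letters.
import Mathlib
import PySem

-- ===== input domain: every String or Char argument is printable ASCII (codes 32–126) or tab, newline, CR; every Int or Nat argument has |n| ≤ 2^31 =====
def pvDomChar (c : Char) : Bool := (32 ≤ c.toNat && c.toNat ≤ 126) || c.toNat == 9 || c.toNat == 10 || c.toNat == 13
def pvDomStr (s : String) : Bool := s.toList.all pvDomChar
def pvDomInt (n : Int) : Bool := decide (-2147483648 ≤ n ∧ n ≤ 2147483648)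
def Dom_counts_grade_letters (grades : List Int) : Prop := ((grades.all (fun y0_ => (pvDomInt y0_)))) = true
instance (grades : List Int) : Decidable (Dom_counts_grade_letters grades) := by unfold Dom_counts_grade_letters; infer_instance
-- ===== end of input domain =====

-- B replaces A's if/elif cascade over a mutable dict by arithmetic bucketing into a
-- letter per grade, counted per key by a dict comprehension (same cost, more idiomatic).

-- ===== PORT A =====
def counts_grade_letters (grades : List Int) : List (String × Int) :=
  (grades.foldl (fun d g =>
      if 90 ≤ g ∧ g ≤ 110 then d.modify "A" 0 (· + 1)
      else if 80 ≤ g ∧ g < 90 then d.modify "B" 0 (· + 1)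
      else if 70 ≤ g ∧ g < 80 then d.modify "C" 0 (· + 1)
      else if 60 ≤ g ∧ g < 70 then d.modify "D" 0 (· + 1)
      else d.modify "F" 0 (· + 1))
    (PySem.Dict.ofList [("A", 0), ("B", 0), ("C", 0), ("D", 0), ("F", 0)])).items

-- ===== PORT B =====
def pvLetter (grade : Int) : String :=
  if grade < 60 ∨ grade > 110 then "F"
  else (PySem.List.pyGet? ["D", "C", "B", "A"]
          (min (PySem.Int.floordiv (grade - 60) 10) 3)).getD ""

def counts_grade_letters_alt (grades : List Int) : List (String × Int) :=
  let letters := grades.map pvLetter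
  ["A", "B", "C", "D", "F"].map (fun k => (k, (letters.count k : Int)))

-- ===== PRECONDITION & SPEC =====
def Spec_counts_grade_letters (grades : List Int) (out : List (String × Int)) : Prop := out = counts_grade_letters_alt grades
instance (grades : List Int) (out : List (String × Int)) : Decidable (Spec_counts_grade_letters grades out) := by unfold Spec_counts_grade_letters; infer_instance

-- ===== CLAIM (what is proved, stated in full; the proofs are below) =====
def Claim_equal_counts_grade_letters : Prop := ∀ (grades : List Int), Dom_counts_grade_letters grades → Spec_counts_grade_letters grades (counts_grade_letters grades)

-- ===== LEMMAS AND PROOFS =====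

-- B's arithmetic bucketing produces exactly the letter of A's branch cascade.
theorem pvLetter_eq (g : Int) :
    pvLetter g =
      if 90 ≤ g ∧ g ≤ 110 then "A"
      else if 80 ≤ g ∧ g < 90 then "B"
      else if 70 ≤ g ∧ g < 80 then "C"
      else if 60 ≤ g ∧ g < 70 then "D"
      else "F" := by
  by_cases h : g < 60 ∨ g > 110
  · simp only [pvLetter, if_pos h]
    rcases h with h | h <;> split_ifs <;> first | rfl | omega
  · have h1 : 60 ≤ g := by omega
    have h2 : g ≤ 110 := by omega
    interval_cases g <;> decide

-- One step of A's fold on the five-key accumulator, in terms of B's letter.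
theorem pvStep (a b c d f : Int) (g : Int) :
    (fun dd : PySem.Dict String Int =>
      if 90 ≤ g ∧ g ≤ 110 then dd.modify "A" 0 (· + 1)
      else if 80 ≤ g ∧ g < 90 then dd.modify "B" 0 (· + 1)
      else if 70 ≤ g ∧ g < 80 then dd.modify "C" 0 (· + 1)
      else if 60 ≤ g ∧ g < 70 then dd.modify "D" 0 (· + 1)
      else dd.modify "F" 0 (· + 1))
      (PySem.Dict.mk [("A", a), ("B", b), ("C", c), ("D", d), ("F", f)]) =
    PySem.Dict.mk
      [("A", a + if pvLetter g = "A" then 1 else 0),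
       ("B", b + if pvLetter g = "B" then 1 else 0),
       ("C", c + if pvLetter g = "C" then 1 else 0),
       ("D", d + if pvLetter g = "D" then 1 else 0),
       ("F", f + if pvLetter g = "F" then 1 else 0)] := by
  rw [pvLetter_eq]
  split_ifs with h1 h2 h3 h4 <;>
    simp_all [PySem.Dict.modify, PySem.Dict.getD, PySem.Dict.get?_mk_cons, PySem.Dict.insert]

-- A's whole fold, with a generalized accumulator.
theorem pvFold (grades : List Int) (a b c d f : Int) :
    grades.foldl (fun dd g =>
      if 90 ≤ g ∧ g ≤ 110 then dd.modify "A" 0 (· + 1)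
      else if 80 ≤ g ∧ g < 90 then dd.modify "B" 0 (· + 1)
      else if 70 ≤ g ∧ g < 80 then dd.modify "C" 0 (· + 1)
      else if 60 ≤ g ∧ g < 70 then dd.modify "D" 0 (· + 1)
      else dd.modify "F" 0 (· + 1))
      (PySem.Dict.mk [("A", a), ("B", b), ("C", c), ("D", d), ("F", f)]) =
    PySem.Dict.mk
      [("A", a + ((grades.map pvLetter).count "A" : Int)),
       ("B", b + ((grades.map pvLetter).count "B" : Int)),
       ("C", c + ((grades.map pvLetter).count "C" : Int)),
       ("D", d + ((grades.map pvLetter).count "D" : Int)),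
       ("F", f + ((grades.map pvLetter).count "F" : Int))] := by
  induction grades generalizing a b c d f with
  | nil => simp
  | cons g rest ih =>
    rw [List.foldl_cons]
    have hstep := pvStep a b c d f g
    simp only at hstep
    rw [hstep, ih]
    simp only [List.map_cons, List.count_cons]
    simp only [List.map_cons, PySem.Dict.mk.injEq, List.cons.injEq,
      Prod.mk.injEq, true_and, and_true, List.count_cons]
    refine ⟨?_, ?_, ?_, ?_, ?_⟩ <;> (push_cast; split_ifs <;> simp_all <;> ring)

-- ===== VERDICT (by name: the statement is the Claim_ definition above) =====
theorem counts_grade_letters_spec : Claim_equal_counts_grade_letters := by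
  intro grades _
  show counts_grade_letters grades = counts_grade_letters_alt grades
  unfold counts_grade_letters counts_grade_letters_alt
  have h0 : PySem.Dict.ofList [("A", (0:Int)), ("B", 0), ("C", 0), ("D", 0), ("F", 0)]
      = PySem.Dict.mk [("A", 0), ("B", 0), ("C", 0), ("D", 0), ("F", 0)] := by decide
  rw [h0, pvFold]
  simp
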